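-- pv_equiv track=rewrite | github.com/lephubui/command-code | youtube/python/problems/min_word_distance.py | min_word_distance
-- ===== SOURCE A (Python) =====
-- def min_word_distance(word_list):
--     # map to keep track of word occurrences and distances
--     map_occurrence = {}
--     map_distance = {}
--
--     # Iterate through the list of words
--     for idx, word in enumerate(word_list):
--         if word in map_occurrence:
--             distance = idx - map_occurrence[word]
--             if word in map_distance: # If word already in map_distance, update the minimum distance
--                 map_distance[word] = min(distance, map_distance[word])
--             else:
--                 map_distance[word] = distance
--         map_occurrence[word] = idx # Update the last occurrence index
--
--     return map_distance
-- ===== SOURCE B (Python) =====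
-- def min_word_distance(word_list):
--     # Two-pass: collect all occurrence indices per word, then take the
--     # minimum consecutive gap for each word that repeats (in the order
--     # words are first seen to repeat).
--     positions = {}
--     repeat_order = []
--     for idx, word in enumerate(word_list):
--         ps = positions.setdefault(word, [])
--         ps.append(idx)
--         if len(ps) == 2:
--             repeat_order.append(word)
--     return {w: min(b - a for a, b in zip(positions[w], positions[w][1:]))
--             for w in repeat_order}
-- ===== Notes on version B (the rewrite author's own statement) =====
-- stated objective: alternative
-- what changed: Replaces A's single pass with incremental last-index/running-min dicts by a two-pass scheme: first group all occurrence indices per word, then compute each repeated word's minimum consecutive gap from its index list.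
import Mathlib
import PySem

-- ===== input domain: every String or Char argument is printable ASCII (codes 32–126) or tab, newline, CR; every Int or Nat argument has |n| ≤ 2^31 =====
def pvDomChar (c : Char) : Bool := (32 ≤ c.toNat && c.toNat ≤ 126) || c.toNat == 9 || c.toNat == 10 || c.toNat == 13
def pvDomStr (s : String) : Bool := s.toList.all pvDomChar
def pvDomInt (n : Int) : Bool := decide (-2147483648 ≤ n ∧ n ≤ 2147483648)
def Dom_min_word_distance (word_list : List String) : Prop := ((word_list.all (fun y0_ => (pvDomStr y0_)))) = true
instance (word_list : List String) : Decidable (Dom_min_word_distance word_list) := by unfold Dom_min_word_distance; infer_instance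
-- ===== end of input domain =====

-- B replaces A's single pass with incremental last-index/running-min dicts by a
-- two-pass scheme (collect all occurrence indices per word, then take each
-- repeated word's minimum consecutive gap); objective: alternative algorithm.


-- ===== PORT A =====
-- loop body of A's single for-loop (state: map_occurrence, map_distance)
def stepA (st : PySem.Dict String Int × PySem.Dict String Int) (p : Int × String) :
    PySem.Dict String Int × PySem.Dict String Int :=
  let occ := st.1
  let dist := st.2
  let dist' :=
    if occ.contains p.2 then
      let d := p.1 - occ.getD p.2 0
      if dist.contains p.2 then dist.insert p.2 (min d (dist.getD p.2 0))
      else dist.insert p.2 d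
    else dist
  (occ.insert p.2 p.1, dist')

def min_word_distance (word_list : List String) : List (String × Int) :=
  ((PySem.List.enumerate word_list 0).foldl stepA (PySem.Dict.empty, PySem.Dict.empty)).2.items

-- ===== PORT B =====
-- min(b - a for a, b in zip(ps, ps[1:]))  (list nonempty wherever B evaluates it)
def gapMin (ps : List Int) : Int :=
  (PySem.List.min? ((ps.zip ps.tail).map (fun q => q.2 - q.1)) (fun x => x)).getD 0

-- loop body of B's first pass (state: positions, repeat_order)
def stepB (st : PySem.Dict String (List Int) × List String) (p : Int × String) :
    PySem.Dict String (List Int) × List String :=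
  let ps' := st.1.getD p.2 [] ++ [p.1]
  (st.1.insert p.2 ps', if ps'.length == 2 then st.2 ++ [p.2] else st.2)

def min_word_distance_alt (word_list : List String) : List (String × Int) :=
  let st := (PySem.List.enumerate word_list 0).foldl stepB (PySem.Dict.empty, [])
  st.2.map (fun w => (w, gapMin (st.1.getD w [])))

-- ===== PRECONDITION & SPEC =====
def Spec_min_word_distance (word_list : List String) (out : List (String × Int)) : Prop := out = min_word_distance_alt word_list
instance (word_list : List String) (out : List (String × Int)) : Decidable (Spec_min_word_distance word_list out) := by unfold Spec_min_word_distance; infer_instance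

-- ===== CLAIM (what is proved, stated in full; the proofs are below) =====
def Claim_equal_min_word_distance : Prop := ∀ (word_list : List String), Dom_min_word_distance word_list → Spec_min_word_distance word_list (min_word_distance word_list)

-- ===== LEMMAS AND PROOFS =====

lemma zip_tail_append (ps : List Int) (h : ps ≠ []) (i : Int) :
    (ps ++ [i]).zip (ps ++ [i]).tail = ps.zip ps.tail ++ [(ps.getLast h, i)] := by
  induction ps with
  | nil => exact absurd rfl h
  | cons a t ih =>
      cases t with
      | nil => simp
      | cons b u =>
          have := ih (by simp)
          simp only [List.cons_append, List.zip_cons_cons, List.tail_cons] at this ⊢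
          rw [this]
          simp [List.getLast]

lemma gapMin_append (ps : List Int) (h : 2 ≤ ps.length) (i : Int) :
    gapMin (ps ++ [i]) = min (gapMin ps) (i - ps.getLast (by intro hn; simp [hn] at h)) := by
  have hne : ps ≠ [] := by intro hn; simp [hn] at h
  unfold gapMin
  rw [zip_tail_append ps hne i]
  obtain ⟨a, b, t, rfl⟩ : ∃ a b t, ps = a :: b :: t := by
    match ps, h with
    | a :: b :: t, _ => exact ⟨a, b, t, rfl⟩
  simp only [List.map_append, List.map_cons, List.map_nil, List.zip_cons_cons, List.tail_cons,
    List.cons_append]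
  rw [PySem.List.min?_id_cons, PySem.List.min?_id_cons]
  simp [List.foldl_append]

lemma gapMin_pair (a b : Int) : gapMin [a, b] = b - a := by
  simp [gapMin, PySem.List.min?_id_cons]

lemma keys_of_items_map (dist : PySem.Dict String Int) (order : List String)
    (f : String → Int)
    (h : dist.items = order.map (fun w => (w, f w))) : dist.keys = order := by
  simp [PySem.Dict.keys, h, List.map_map, Function.comp_def]

-- the four facts tying A's state (occ, dist) to B's state (pos, order)
def PortInv (occ dist : PySem.Dict String Int) (pos : PySem.Dict String (List Int))
    (order : List String) : Prop :=
  (∀ w, occ.get? w = (pos.getD w []).getLast?) ∧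
  dist.items = order.map (fun w => (w, gapMin (pos.getD w []))) ∧
  (∀ w, w ∈ order ↔ 2 ≤ (pos.getD w []).length) ∧
  order.Nodup

lemma step_preserves (occ dist : PySem.Dict String Int)
    (pos : PySem.Dict String (List Int)) (order : List String) (s : Int) (x : String)
    (h : PortInv occ dist pos order) :
    PortInv (stepA (occ, dist) (s, x)).1 (stepA (occ, dist) (s, x)).2
        (stepB (pos, order) (s, x)).1 (stepB (pos, order) (s, x)).2 := by
  obtain ⟨h1, h2, h3, h4⟩ := h
  have hxo : x ∉ order → ∀ w ∈ order, w ≠ x := fun hx w hw hwx => hx (hwx ▸ hw)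
  rcases hps : pos.getD x [] with _ | ⟨p, _ | ⟨q, t⟩⟩
  · -- first occurrence of x
    have hc : occ.contains x = false := by
      rw [PySem.Dict.contains_eq_isSome_get?, h1 x, hps]; rfl
    have hxn : x ∉ order := by intro hx; have := (h3 x).1 hx; rw [hps] at this; simp at this
    have hB : stepB (pos, order) (s, x) = (pos.insert x [s], order) := by
      simp [stepB, hps]
    have hA : stepA (occ, dist) (s, x) = (occ.insert x s, dist) := by
      simp [stepA, hc]
    rw [hA, hB]
    refine ⟨?_, ?_, ?_, h4⟩
    · intro w
      by_cases hw : w = x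
      · subst hw; simp [PySem.Dict.get?_insert_self, PySem.Dict.getD_insert_self]
      · rw [PySem.Dict.get?_insert_of_ne _ _ hw, PySem.Dict.getD_insert_of_ne _ _ _ hw, h1]
    · rw [h2]
      exact List.map_congr_left fun w hw => by
        rw [PySem.Dict.getD_insert_of_ne _ _ _ (hxo hxn w hw)]
    · intro w
      by_cases hw : w = x
      · subst hw
        simp [PySem.Dict.getD_insert_self, hxn]
      · rw [PySem.Dict.getD_insert_of_ne _ _ _ hw]; exact h3 w
  · -- second occurrence of x
    have hc : occ.contains x = true := by
      rw [PySem.Dict.contains_eq_isSome_get?, h1 x, hps]; rfl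
    have hxn : x ∉ order := by intro hx; have := (h3 x).1 hx; rw [hps] at this; simp at this
    have hcd : dist.contains x = false := by
      rw [PySem.Dict.contains_eq_decide_mem_keys, keys_of_items_map dist order _ h2]
      simpa using hxn
    have hocc : occ.getD x 0 = p := by
      rw [PySem.Dict.getD_eq_get?_getD, h1 x, hps]; rfl
    have hB : stepB (pos, order) (s, x) = (pos.insert x [p, s], order ++ [x]) := by
      simp [stepB, hps]
    have hA : stepA (occ, dist) (s, x) = (occ.insert x s, dist.insert x (s - p)) := by
      simp [stepA, hc, hcd, hocc]
    rw [hA, hB]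
    refine ⟨?_, ?_, ?_, by simpa [List.nodup_append] using ⟨h4, fun a ha hax => hxn (hax ▸ ha)⟩⟩
    · intro w
      by_cases hw : w = x
      · subst hw; simp [PySem.Dict.get?_insert_self, PySem.Dict.getD_insert_self]
      · rw [PySem.Dict.get?_insert_of_ne _ _ hw, PySem.Dict.getD_insert_of_ne _ _ _ hw, h1]
    · rw [PySem.Dict.items_insert_of_not_contains _ _ hcd, h2, List.map_append]
      congr 1
      · exact List.map_congr_left fun w hw => by
          rw [PySem.Dict.getD_insert_of_ne _ _ _ (hxo hxn w hw)]
      · simp [PySem.Dict.getD_insert_self, gapMin_pair]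
    · intro w
      by_cases hw : w = x
      · subst hw; simp [PySem.Dict.getD_insert_self]
      · rw [PySem.Dict.getD_insert_of_ne _ _ _ hw]
        simp only [List.mem_append, List.mem_singleton, hw, or_false]
        exact h3 w
  · -- third or later occurrence of x
    have hc : occ.contains x = true := by
      rw [PySem.Dict.contains_eq_isSome_get?, h1 x, hps]
      simp [List.getLast?_cons_cons]
    have hxm : x ∈ order := (h3 x).2 (by rw [hps]; simp)
    have hcd : dist.contains x = true := by
      rw [PySem.Dict.contains_eq_decide_mem_keys, keys_of_items_map dist order _ h2]
      simpa using hxm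
    have hne : (p :: q :: t) ≠ ([] : List Int) := by simp
    have hlast : (pos.getD x []).getLast? = some ((p :: q :: t).getLast hne) := by
      rw [hps, List.getLast?_eq_some_getLast]
    have hocc : occ.getD x 0 = (p :: q :: t).getLast hne := by
      rw [PySem.Dict.getD_eq_get?_getD, h1 x, hlast]; rfl
    have hold : dist.getD x 0 = gapMin (p :: q :: t) := by
      have hk : dist.keys.Nodup := by rw [keys_of_items_map dist order _ h2]; exact h4
      rw [PySem.Dict.getD_of_mem_items _ (by rw [h2]; exact List.mem_map_of_mem hxm) hk 0, hps]
    have hB : stepB (pos, order) (s, x) = (pos.insert x (p :: q :: t ++ [s]), order) := by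
      simp [stepB, hps]
    have hA : stepA (occ, dist) (s, x) =
        (occ.insert x s,
         dist.insert x (min (s - (p :: q :: t).getLast hne) (gapMin (p :: q :: t)))) := by
      simp [stepA, hc, hcd, hocc, hold]
    rw [hA, hB]
    refine ⟨?_, ?_, ?_, h4⟩
    · intro w
      by_cases hw : w = x
      · subst hw
        simp only [PySem.Dict.get?_insert_self, PySem.Dict.getD_insert_self]
        rw [show p :: q :: t ++ [s] = (p :: q :: t) ++ [s] from rfl, List.getLast?_concat]
      · rw [PySem.Dict.get?_insert_of_ne _ _ hw, PySem.Dict.getD_insert_of_ne _ _ _ hw, h1]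
    · rw [PySem.Dict.items_insert_of_contains _ _ hcd, h2, List.map_map]
      exact List.map_congr_left fun w hw => by
        by_cases hwx : w = x
        · subst hwx
          simp only [Function.comp_apply, beq_self_eq_true, if_true,
            PySem.Dict.getD_insert_self]
          rw [gapMin_append (p :: q :: t) (by simp) s, min_comm]
        · simp only [Function.comp_apply]
          rw [if_neg (by simpa using hwx), PySem.Dict.getD_insert_of_ne _ _ _ hwx]
    · intro w
      by_cases hw : w = x
      · subst hw
        simp only [PySem.Dict.getD_insert_self]
        constructor
        · intro _; simp [List.length_append]
        · intro _; exact hxm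
      · rw [PySem.Dict.getD_insert_of_ne _ _ _ hw]; exact h3 w

-- the invariant carried through both loops
lemma loop_inv (ws : List String) (s : Int)
    (occ dist : PySem.Dict String Int) (pos : PySem.Dict String (List Int)) (order : List String)
    (h1 : ∀ w, occ.get? w = (pos.getD w []).getLast?)
    (h2 : dist.items = order.map (fun w => (w, gapMin (pos.getD w []))))
    (h3 : ∀ w, w ∈ order ↔ 2 ≤ (pos.getD w []).length)
    (h4 : order.Nodup) :
    (∀ w, (((PySem.List.enumerate ws s).foldl stepA (occ, dist)).1.get? w =
        ((((PySem.List.enumerate ws s).foldl stepB (pos, order)).1.getD w []).getLast?)) ) ∧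
    ((PySem.List.enumerate ws s).foldl stepA (occ, dist)).2.items =
      (((PySem.List.enumerate ws s).foldl stepB (pos, order)).2.map
        (fun w => (w, gapMin (((PySem.List.enumerate ws s).foldl stepB (pos, order)).1.getD w [])))) ∧
    (∀ w, w ∈ ((PySem.List.enumerate ws s).foldl stepB (pos, order)).2 ↔
        2 ≤ ((((PySem.List.enumerate ws s).foldl stepB (pos, order)).1.getD w []).length)) ∧
    ((PySem.List.enumerate ws s).foldl stepB (pos, order)).2.Nodup := by
  induction ws generalizing s occ dist pos order with
  | nil => exact ⟨h1, h2, h3, h4⟩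
  | cons x ws ih =>
      rw [PySem.List.enumerate_cons]
      simp only [List.foldl_cons]
      obtain ⟨n1, n2, n3, n4⟩ := step_preserves occ dist pos order s x ⟨h1, h2, h3, h4⟩
      exact ih (s + 1) _ _ _ _ n1 n2 n3 n4

-- ===== VERDICT (by name: the statement is the Claim_ definition above) =====
theorem min_word_distance_spec : Claim_equal_min_word_distance := by
  intro ws _
  unfold Spec_min_word_distance min_word_distance min_word_distance_alt
  exact (loop_inv ws 0 PySem.Dict.empty PySem.Dict.empty PySem.Dict.empty []
    (by intro w; simp [PySem.Dict.get?_empty, PySem.Dict.getD_empty])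
    (by simp [PySem.Dict.empty])
    (by intro w; simp [PySem.Dict.getD_empty])
    (by simp)).2.1
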